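-- pv_equiv track=rewrite | github.com/BrianQcq/LeetCode | src/Twitter_OA.py | anaDiff
-- ===== SOURCE A (Python) =====
-- def anaDiff(s1, s2):
-- 	"""
-- 	s1: list[str]
-- 	s2: list[str]
-- 	"""
--
-- 	res = []
-- 	for i in range(len(s1)):
-- 		first = s1[i]
-- 		second = s2[i]
-- 		if len(first) != len(second):
-- 			res.append(-1)
-- 		else:
-- 			count = 0
-- 			char_count = [0] * 26
--
-- 			for j in range(len(first)):
-- 				char_count[ord(first[j]) - ord('a')] += 1
--
-- 			for j in range(len(second)):
-- 				char_count[ord(second[j]) - ord('a')] -= 1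
-- 				if char_count[ord(second[j]) - ord('a')] < 0:
-- 					count += 1
-- 			res.append(count)
--
-- 	return res
-- ===== SOURCE B (Python) =====
-- def anaDiff(s1, s2):
--     res = []
--     for first, second in zip(s1, s2):
--         if len(first) != len(second):
--             res.append(-1)
--             continue
--         a = sorted(first)
--         b = sorted(second)
--         i = j = m = 0
--         while i < len(a) and j < len(b):
--             if a[i] == b[j]:
--                 m += 1
--                 i += 1
--                 j += 1
--             elif a[i] < b[j]:
--                 i += 1
--             else:
--                 j += 1
--         res.append(len(second) - m)
--     return res
-- ===== Notes on version B (the rewrite author's own statement) =====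
-- stated objective: alternative
-- what changed: Replaces A's 26-bucket frequency-count-and-decrement with sorting both strings and a two-pointer merge that counts the multiset intersection, returning len(second) minus the matches; the -1 on length mismatch is kept.
-- outside the precondition, e.g. on anaDiff(['G'], ['a']): A returns [0], B returns [1]
import Mathlib
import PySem

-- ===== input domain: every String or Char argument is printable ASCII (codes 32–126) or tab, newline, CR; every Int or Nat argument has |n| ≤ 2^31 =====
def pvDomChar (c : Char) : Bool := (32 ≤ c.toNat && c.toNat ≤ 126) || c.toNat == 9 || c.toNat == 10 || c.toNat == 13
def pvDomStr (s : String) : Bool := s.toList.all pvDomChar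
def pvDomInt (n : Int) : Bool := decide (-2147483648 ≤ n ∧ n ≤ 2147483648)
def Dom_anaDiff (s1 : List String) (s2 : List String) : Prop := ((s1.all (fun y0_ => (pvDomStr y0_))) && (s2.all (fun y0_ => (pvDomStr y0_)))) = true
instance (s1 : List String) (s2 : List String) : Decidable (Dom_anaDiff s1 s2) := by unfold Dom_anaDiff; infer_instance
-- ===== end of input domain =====

-- B replaces A's 26-bucket frequency counting with sorting both strings and a two-pointer
-- merge counting the multiset intersection; answer = len(second) - matches (objective: alternative).


-- ===== PORT A =====
-- char_count[i] += d  (Python list indexing: negative index wraps, out of range raises — pySetD/pyGetD, exact under Pre_)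
def pvBump (a : List Int) (i : Int) (d : Int) : List Int :=
  PySem.List.pySetD a i (PySem.List.pyGetD a i 0 + d)

def anaDiff (s1 : List String) (s2 : List String) : List Int :=
  (List.range s1.length).foldl (fun res (i : Nat) =>
    let first := ((PySem.List.pyGet? s1 (i : Int)).getD "").toList
    let second := ((PySem.List.pyGet? s2 (i : Int)).getD "").toList
    res ++ [if first.length ≠ second.length then (-1 : Int)
      else
        let cc := first.foldl (fun a ch => pvBump a ((ch.toNat : Int) - 97) 1)
          (List.replicate 26 (0 : Int))
        let p := second.foldl (fun (q : List Int × Int) ch =>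
            let a := pvBump q.1 ((ch.toNat : Int) - 97) (-1)
            (a, if PySem.List.pyGetD a ((ch.toNat : Int) - 97) 0 < 0 then q.2 + 1 else q.2))
          (cc, (0 : Int))
        p.2]) []

-- ===== PORT B =====
-- the two-pointer while loop over sorted(first)/sorted(second), as structural recursion on the
-- two suffixes; Python's '<' on one-character strings is code-point order, ported as toNat
def pvMerge : List Char → List Char → Int
  | [], _ => 0
  | _ :: _, [] => 0
  | x :: xs, y :: ys =>
    if x = y then 1 + pvMerge xs ys
    else if x.toNat < y.toNat then pvMerge xs (y :: ys)
    else pvMerge (x :: xs) ys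
termination_by a b => a.length + b.length

def anaDiff_alt (s1 : List String) (s2 : List String) : List Int :=
  (s1.zip s2).foldl (fun res pr =>
    let first := pr.1.toList
    let second := pr.2.toList
    res ++ [if first.length ≠ second.length then (-1 : Int)
      else (second.length : Int)
        - pvMerge (PySem.List.sorted first (fun c => c) false)
                  (PySem.List.sorted second (fun c => c) false)]) []

-- ===== PRECONDITION & SPEC =====
def pvLowerOK (ch : Char) : Bool := 97 ≤ ch.toNat && ch.toNat ≤ 122

-- Pre_ restricts to the task's natural all-lowercase domain (and s1 no longer than s2): outside it
-- A raises IndexError on any equal-length pair with a character coded below 71 or above 122 (or when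
-- s2 is shorter), and on codes 71–96 A's negative-index wraparound aliases e.g. 'G' onto the slot of
-- 'a' while B compares characters literally — on such out-of-alphabet input neither value is
-- specified by the task, so both behaviours are defensible and those inputs are excluded.
def Pre_anaDiff (s1 : List String) (s2 : List String) : Prop :=
  s1.length ≤ s2.length ∧
  ∀ p ∈ s1.zip s2, p.1.toList.length = p.2.toList.length →
    p.1.toList.all pvLowerOK = true ∧ p.2.toList.all pvLowerOK = true

instance (s1 : List String) (s2 : List String) : Decidable (Pre_anaDiff s1 s2) := by
  unfold Pre_anaDiff; infer_instance

def pvWitness_anaDiff : List String × List String := (["ab"], ["ba"])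

def Spec_anaDiff (s1 : List String) (s2 : List String) (out : List Int) : Prop := out = anaDiff_alt s1 s2
instance (s1 : List String) (s2 : List String) (out : List Int) : Decidable (Spec_anaDiff s1 s2 out) := by unfold Spec_anaDiff; infer_instance

-- ===== CLAIM (what is proved, stated in full; the proofs are below) =====
def Claim_equal_anaDiff : Prop := ∀ (s1 : List String) (s2 : List String), Dom_anaDiff s1 s2 → Pre_anaDiff s1 s2 → Spec_anaDiff s1 s2 (anaDiff s1 s2)


-- ===== LEMMAS AND PROOFS =====

-- ord(ch) - 97 is a valid Python index into a 26-list iff 71 ≤ ord(ch) ≤ 122 (negative indices wrap)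
def pvCharOK (ch : Char) : Bool := 71 ≤ ch.toNat && ch.toNat ≤ 122

-- the effective (wrapped) table slot of a character
def pvEff (ch : Char) : Nat := if 97 ≤ ch.toNat then ch.toNat - 97 else ch.toNat - 71

-- occurrences of slot c in cs, as an Int
def pvCnt (cs : List Char) (c : Nat) : Int := (cs.countP (fun ch => pvEff ch == c) : Int)

lemma pvLower_charOK (ch : Char) (h : pvLowerOK ch = true) : pvCharOK ch = true := by
  simp [pvLowerOK] at h; simp [pvCharOK]; omega

lemma pvEff_lower (ch : Char) (h : pvLowerOK ch = true) : pvEff ch = ch.toNat - 97 := by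
  simp [pvLowerOK] at h; simp [pvEff, h.1]

lemma pvEff_lt (ch : Char) (h : pvCharOK ch = true) : pvEff ch < 26 := by
  simp [pvCharOK] at h; unfold pvEff; split <;> omega

lemma pvCnt_nonneg (cs : List Char) (c : Nat) : 0 ≤ pvCnt cs c := Int.natCast_nonneg _

lemma pvCnt_nil (c : Nat) : pvCnt [] c = 0 := rfl

lemma pvCnt_cons (ch : Char) (cs : List Char) (c : Nat) :
    pvCnt (ch :: cs) c = (if pvEff ch = c then 1 else 0) + pvCnt cs c := by
  by_cases h : pvEff ch = c
  · simp [pvCnt, h]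
    omega
  · simp [pvCnt, h]

lemma pvBump_eq_set (a : List Int) (ch : Char) (d : Int) (ha : a.length = 26)
    (h : pvCharOK ch = true) :
    pvBump a ((ch.toNat : Int) - 97) d = a.set (pvEff ch) (a.getD (pvEff ch) 0 + d) := by
  simp [pvCharOK] at h
  unfold pvBump pvEff
  by_cases h97 : 97 ≤ ch.toNat
  · have : ((ch.toNat : Int) - 97) = ((ch.toNat - 97 : Nat) : Int) := by omega
    rw [this, if_pos h97]
    simp [PySem.List.pySetD_natCast, PySem.List.pyGetD_natCast]
  · have hk : ((ch.toNat : Int) - 97) = -(((97 - ch.toNat : Nat)) : Int) := by omega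
    rw [hk, if_neg h97]
    rw [PySem.List.pySetD, PySem.List.pySet?, PySem.List.pyIdx?]
    rw [if_neg (by omega), if_pos (by omega)]
    rw [PySem.List.pyGetD_neg_natCast _ _ _ (by omega) (by omega)]
    have h1 : a.length - (97 - ch.toNat) = ch.toNat - 71 := by omega
    have h2 : ((-(-((97 - ch.toNat : Nat) : Int))).toNat) = 97 - ch.toNat := by omega
    simp only [Option.getD_some, Option.map_some, neg_neg, h1]
    congr 1
    rw [List.getD_eq_getElem _ _ (by omega)]

lemma pvGetD_set_eq (a : List Int) (e : Nat) (v : Int) (c : Nat) (he : e < a.length) :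
    (a.set e v).getD c 0 = if c = e then v else a.getD c 0 := by
  by_cases hc : c = e
  · subst hc
    rw [if_pos rfl, List.getD_eq_getElem _ _ (by simpa using he)]
    simp
  · rw [if_neg hc]
    by_cases hcl : c < a.length
    · rw [List.getD_eq_getElem _ _ (by simpa using hcl), List.getD_eq_getElem _ _ hcl]
      simp [Ne.symm hc]
    · rw [List.getD_eq_default _ _ (by simpa using hcl), List.getD_eq_default _ _ (by omega)]

lemma pvPeek_eq (a : List Int) (ch : Char) (ha : a.length = 26) (h : pvCharOK ch = true) :
    PySem.List.pyGetD a ((ch.toNat : Int) - 97) 0 = a.getD (pvEff ch) 0 := by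
  simp [pvCharOK] at h
  unfold pvEff
  by_cases h97 : 97 ≤ ch.toNat
  · have : ((ch.toNat : Int) - 97) = ((ch.toNat - 97 : Nat) : Int) := by omega
    rw [this, if_pos h97]; simp
  · have hk : ((ch.toNat : Int) - 97) = -(((97 - ch.toNat : Nat)) : Int) := by omega
    rw [hk, if_neg h97]
    rw [PySem.List.pyGetD_neg_natCast _ _ _ (by omega) (by omega)]
    rw [List.getD_eq_getElem _ _ (by omega)]
    congr 1; omega

lemma pvTallyAux_len (cs : List Char) (a : List Int) :
    (cs.foldl (fun a ch => pvBump a ((ch.toNat : Int) - 97) 1) a).length = a.length := by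
  induction cs generalizing a with
  | nil => rfl
  | cons ch cs ih =>
    simp only [List.foldl_cons]
    rw [ih]
    simp [pvBump, PySem.List.length_pySetD]

lemma pvTallyAux_getD (cs : List Char) (a : List Int) (c : Nat) (ha : a.length = 26)
    (hcs : ∀ ch ∈ cs, pvCharOK ch = true) (hc : c < 26) :
    (cs.foldl (fun a ch => pvBump a ((ch.toNat : Int) - 97) 1) a).getD c 0
      = a.getD c 0 + pvCnt cs c := by
  induction cs generalizing a with
  | nil => simp [pvCnt_nil]
  | cons ch cs ih =>
    have hch := hcs ch (by simp)
    simp only [List.foldl_cons]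
    rw [pvBump_eq_set a ch 1 ha hch]
    rw [ih _ (by simpa using ha) (fun x hx => hcs x (by simp [hx]))]
    rw [pvGetD_set_eq _ _ _ _ (by rw [ha]; exact pvEff_lt ch hch), pvCnt_cons]
    by_cases hce : c = pvEff ch
    · subst hce; rw [if_pos rfl, if_pos rfl]; omega
    · rw [if_neg hce, if_neg (fun h => hce h.symm)]; omega

-- invariant of A's decrement loop: final count = initial count + Σ_c (r_c - min r_c (a_c)⁺)
lemma pvLoop_count (cs : List Char) (a : List Int) (k : Int) (ha : a.length = 26)
    (hcs : ∀ ch ∈ cs, pvCharOK ch = true) :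
    (cs.foldl (fun (q : List Int × Int) ch =>
        let a := pvBump q.1 ((ch.toNat : Int) - 97) (-1)
        (a, if PySem.List.pyGetD a ((ch.toNat : Int) - 97) 0 < 0 then q.2 + 1 else q.2))
      (a, k)).2
      = k + ∑ c ∈ Finset.range 26, (pvCnt cs c - min (pvCnt cs c) (max (a.getD c 0) 0)) := by
  induction cs generalizing a k with
  | nil => simp [pvCnt_nil]
  | cons ch cs ih =>
    have hch := hcs ch (by simp)
    have helt : pvEff ch < 26 := pvEff_lt ch hch
    simp only [List.foldl_cons]
    rw [pvBump_eq_set a ch (-1) ha hch]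
    set a' := a.set (pvEff ch) (a.getD (pvEff ch) 0 + (-1)) with ha'
    have ha'len : a'.length = 26 := by rw [ha', List.length_set, ha]
    have hpeek : PySem.List.pyGetD a' ((ch.toNat : Int) - 97) 0 = a.getD (pvEff ch) 0 - 1 := by
      rw [pvPeek_eq a' ch ha'len hch, ha', pvGetD_set_eq _ _ _ _ (by omega)]
      rw [if_pos rfl]; ring
    rw [hpeek, ih a' _ ha'len (fun x hx => hcs x (by simp [hx]))]
    have hmem : pvEff ch ∈ Finset.range 26 := Finset.mem_range.mpr helt
    rw [Finset.sum_eq_sum_diff_singleton_add hmem, Finset.sum_eq_sum_diff_singleton_add hmem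
      (fun c => pvCnt (ch :: cs) c - min (pvCnt (ch :: cs) c) (max (a.getD c 0) 0))]
    have hoff : ∀ c ∈ Finset.range 26 \ {pvEff ch},
        (pvCnt cs c - min (pvCnt cs c) (max (a'.getD c 0) 0))
          = (pvCnt (ch :: cs) c - min (pvCnt (ch :: cs) c) (max (a.getD c 0) 0)) := by
      intro c hcm
      have hcne : c ≠ pvEff ch := by simp at hcm; exact hcm.2
      rw [pvCnt_cons, if_neg (fun h => hcne h.symm), ha',
        pvGetD_set_eq _ _ _ _ (by omega), if_neg hcne]
      ring_nf
    rw [Finset.sum_congr rfl hoff]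
    have hdiag : a'.getD (pvEff ch) 0 = a.getD (pvEff ch) 0 - 1 := by
      rw [ha', pvGetD_set_eq _ _ _ _ (by omega), if_pos rfl]; ring
    rw [hdiag, pvCnt_cons, if_pos rfl]
    have ht := pvCnt_nonneg cs (pvEff ch)
    by_cases hv : a.getD (pvEff ch) 0 - 1 < 0
    · rw [if_pos hv]; omega
    · rw [if_neg hv]; omega

-- Σ over the 26 slots of the per-slot count is the length (all characters lowercase)
lemma pvSumCnt (cs : List Char) (hcs : ∀ ch ∈ cs, pvLowerOK ch = true) :
    ∑ c ∈ Finset.range 26, pvCnt cs c = (cs.length : Int) := by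
  induction cs with
  | nil => simp [pvCnt_nil]
  | cons ch cs ih =>
    have hch := hcs ch (by simp)
    have helt : pvEff ch < 26 := pvEff_lt ch (pvLower_charOK ch hch)
    simp only [Finset.sum_congr rfl (fun c _ => pvCnt_cons ch cs c), Finset.sum_add_distrib]
    rw [ih (fun x hx => hcs x (by simp [hx]))]
    have : (∑ c ∈ Finset.range 26, if pvEff ch = c then (1 : Int) else 0) = 1 := by
      rw [Finset.sum_ite_eq (Finset.range 26) (pvEff ch) (fun _ => (1 : Int))]
      simp [helt]
    rw [this]
    simp
    omega

-- slot count is zero when every element is code-point-strictly above ch (all lowercase)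
lemma pvCnt_zero_of_gt (ch : Char) (cs : List Char) (hch : pvLowerOK ch = true)
    (hcs : ∀ z ∈ cs, pvLowerOK z = true) (hgt : ∀ z ∈ cs, ch.toNat < z.toNat) :
    pvCnt cs (pvEff ch) = 0 := by
  unfold pvCnt
  norm_num [List.countP_eq_zero]
  intro z hz
  have h1 := pvEff_lower z (hcs z hz)
  have h2 := pvEff_lower ch hch
  have h3 := hgt z hz
  simp [pvLowerOK] at hch
  rw [h1, h2]
  omega

-- the merge of two sorted lowercase lists counts Σ_c min of the slot counts
lemma pvMerge_sum (a b : List Char)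
    (hpa : a.Pairwise (fun x y => x.toNat ≤ y.toNat)) (hpb : b.Pairwise (fun x y => x.toNat ≤ y.toNat))
    (hla : ∀ ch ∈ a, pvLowerOK ch = true) (hlb : ∀ ch ∈ b, pvLowerOK ch = true) :
    pvMerge a b = ∑ c ∈ Finset.range 26, min (pvCnt a c) (pvCnt b c) := by
  induction a, b using pvMerge.induct with
  | case1 b =>
    have : ∀ c ∈ Finset.range 26, min (pvCnt ([] : List Char) c) (pvCnt b c) = 0 := by
      intro c _
      have := pvCnt_nonneg b c
      simp [pvCnt_nil]
      omega
    rw [pvMerge, Finset.sum_congr rfl this]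
    simp
  | case2 x xs =>
    have : ∀ c ∈ Finset.range 26, min (pvCnt (x :: xs) c) (pvCnt ([] : List Char) c) = 0 := by
      intro c _
      have := pvCnt_nonneg (x :: xs) c
      simp [pvCnt_nil]
      omega
    rw [pvMerge, Finset.sum_congr rfl this]
    simp
  | case3 xs x ys ih =>
    rw [pvMerge, if_pos rfl]
    rw [ih (List.Pairwise.of_cons hpa) (List.Pairwise.of_cons hpb)
      (fun z hz => hla z (by simp [hz])) (fun z hz => hlb z (by simp [hz]))]
    have helt : pvEff x < 26 := pvEff_lt x (pvLower_charOK x (hla x (by simp)))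
    have hmem : pvEff x ∈ Finset.range 26 := Finset.mem_range.mpr helt
    rw [Finset.sum_eq_sum_diff_singleton_add hmem, Finset.sum_eq_sum_diff_singleton_add hmem
      (fun c => min (pvCnt (x :: xs) c) (pvCnt (x :: ys) c))]
    have hoff : ∀ c ∈ Finset.range 26 \ {pvEff x},
        min (pvCnt xs c) (pvCnt ys c) = min (pvCnt (x :: xs) c) (pvCnt (x :: ys) c) := by
      intro c hcm
      have hcne : c ≠ pvEff x := by simp at hcm; exact hcm.2
      rw [pvCnt_cons, pvCnt_cons, if_neg (fun h => hcne h.symm)]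
      ring_nf
    rw [Finset.sum_congr rfl hoff]
    rw [pvCnt_cons, pvCnt_cons, if_pos rfl]
    have h1 := pvCnt_nonneg xs (pvEff x)
    have h2 := pvCnt_nonneg ys (pvEff x)
    omega
  | case4 x xs y ys hne hlt ih =>
    rw [pvMerge, if_neg hne, if_pos hlt]
    rw [ih (List.Pairwise.of_cons hpa) hpb (fun z hz => hla z (by simp [hz])) hlb]
    apply Finset.sum_congr rfl
    intro c hc
    by_cases hcx : c = pvEff x
    · subst hcx
      have hz : pvCnt (y :: ys) (pvEff x) = 0 := by
        apply pvCnt_zero_of_gt x _ (hla x (by simp)) (fun z hz => hlb z hz)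
        intro z hz
        rcases List.mem_cons.mp hz with h | h
        · subst h; exact hlt
        · have := (List.pairwise_cons.mp hpb).1 z h
          omega
      rw [hz, pvCnt_cons x xs (pvEff x), if_pos rfl]
      have h1 := pvCnt_nonneg xs (pvEff x)
      omega
    · rw [pvCnt_cons x xs c, if_neg (fun h => hcx h.symm)]
      ring_nf
  | case5 x xs y ys hne hge ih =>
    rw [pvMerge, if_neg hne, if_neg hge]
    rw [ih hpa (List.Pairwise.of_cons hpb) hla (fun z hz => hlb z (by simp [hz]))]
    apply Finset.sum_congr rfl
    intro c hc
    by_cases hcy : c = pvEff y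
    · subst hcy
      have hylt : y.toNat < x.toNat := by
        have hxy : x.toNat ≠ y.toNat := by
          intro h
          exact hne (Char.ext (UInt32.toNat_inj.mp h))
        omega
      have hz : pvCnt (x :: xs) (pvEff y) = 0 := by
        apply pvCnt_zero_of_gt y _ (hlb y (by simp)) (fun z hz => hla z hz)
        intro z hz
        rcases List.mem_cons.mp hz with h | h
        · subst h; exact hylt
        · have := (List.pairwise_cons.mp hpa).1 z h
          omega
      rw [hz, pvCnt_cons y ys (pvEff y), if_pos rfl]
      have h2 := pvCnt_nonneg ys (pvEff y)
      omega
    · rw [pvCnt_cons y ys c, if_neg (fun h => hcy h.symm)]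
      ring_nf

-- pvCnt is invariant under permutation (sorting)
lemma pvCnt_sorted (l : List Char) (c : Nat) :
    pvCnt (PySem.List.sorted l (fun ch => ch) false) c = pvCnt l c := by
  unfold pvCnt
  rw [(PySem.List.sorted_perm l (fun ch => ch) false).countP_eq]

-- the per-pair count equality
lemma pvPair_eq (first second : List Char)
    (h1 : ∀ ch ∈ first, pvLowerOK ch = true) (h2 : ∀ ch ∈ second, pvLowerOK ch = true) :
    (second.foldl (fun (q : List Int × Int) ch =>
        let a := pvBump q.1 ((ch.toNat : Int) - 97) (-1)
        (a, if PySem.List.pyGetD a ((ch.toNat : Int) - 97) 0 < 0 then q.2 + 1 else q.2))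
      (first.foldl (fun a ch => pvBump a ((ch.toNat : Int) - 97) 1)
        (List.replicate 26 (0 : Int)), (0 : Int))).2
      = (second.length : Int)
        - pvMerge (PySem.List.sorted first (fun c => c) false)
                  (PySem.List.sorted second (fun c => c) false) := by
  have h1' : ∀ ch ∈ first, pvCharOK ch = true := fun ch h => pvLower_charOK ch (h1 ch h)
  have h2' : ∀ ch ∈ second, pvCharOK ch = true := fun ch h => pvLower_charOK ch (h2 ch h)
  have hlen : (first.foldl (fun a ch => pvBump a ((ch.toNat : Int) - 97) 1)
      (List.replicate 26 (0 : Int))).length = 26 := by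
    rw [pvTallyAux_len]; simp
  rw [pvLoop_count second _ 0 hlen h2', zero_add]
  have hsa : PySem.List.sorted first (fun c => c) false
      |>.Pairwise (fun x y => x.toNat ≤ y.toNat) := by
    have := PySem.List.sorted_pairwise first (fun c => c) (κ := Char)
    exact this.imp (fun h => by
      simpa [Char.le_def, UInt32.le_iff_toNat_le] using h)
  have hsb : PySem.List.sorted second (fun c => c) false
      |>.Pairwise (fun x y => x.toNat ≤ y.toNat) := by
    have := PySem.List.sorted_pairwise second (fun c => c) (κ := Char)
    exact this.imp (fun h => by
      simpa [Char.le_def, UInt32.le_iff_toNat_le] using h)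
  rw [pvMerge_sum _ _ hsa hsb
    (fun z hz => h1 z ((PySem.List.mem_sorted _ _ _ _).mp hz))
    (fun z hz => h2 z ((PySem.List.mem_sorted _ _ _ _).mp hz))]
  have hc : ∀ c ∈ Finset.range 26,
      min (pvCnt (PySem.List.sorted first (fun c => c) false) c)
          (pvCnt (PySem.List.sorted second (fun c => c) false) c)
        = min (pvCnt first c) (pvCnt second c) := by
    intro c _
    rw [pvCnt_sorted, pvCnt_sorted]
  rw [Finset.sum_congr rfl hc]
  have htally : ∀ c ∈ Finset.range 26,
      (pvCnt second c - min (pvCnt second c)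
        (max ((first.foldl (fun a ch => pvBump a ((ch.toNat : Int) - 97) 1)
          (List.replicate 26 (0 : Int))).getD c 0) 0))
        = pvCnt second c - min (pvCnt first c) (pvCnt second c) := by
    intro c hcm
    have hc26 : c < 26 := Finset.mem_range.mp hcm
    rw [pvTallyAux_getD first _ c (by simp) h1' hc26]
    rw [List.getD_eq_getElem _ _ (by simpa using hc26), List.getElem_replicate]
    have := pvCnt_nonneg first c
    have := pvCnt_nonneg second c
    omega
  rw [Finset.sum_congr rfl htally]
  rw [Finset.sum_sub_distrib, pvSumCnt second h2]

-- ===== VERDICT (by name: the statement is the Claim_ definition above) =====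
theorem anaDiff_spec : Claim_equal_anaDiff := by
  intro s1 s2 _hdom hpre
  obtain ⟨hlen, hpairs⟩ := hpre
  unfold Spec_anaDiff anaDiff anaDiff_alt
  rw [PySem.List.foldl_append_singleton_eq_map, PySem.List.foldl_append_singleton_eq_map]
  apply List.ext_getElem
  · simp [List.length_zip]; omega
  · intro i hi1 hi2
    simp only [List.nil_append, List.getElem_map, List.getElem_range, List.getElem_zip]
    have hi : i < s1.length := by simpa using hi1
    have hi2' : i < s2.length := by omega
    have hz : i < (s1.zip s2).length := by simpa using hi2
    simp only [PySem.List.pyGet?_natCast, List.getElem?_eq_getElem, hi, hi2', Option.getD_some]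
    by_cases hne : (s1[i]).toList.length ≠ (s2[i]).toList.length
    · rw [if_pos hne, if_pos hne]
    · rw [if_neg hne, if_neg hne]
      have hmem : (s1[i], s2[i]) ∈ s1.zip s2 := by
        have := List.getElem_mem hz
        simpa [List.getElem_zip] using this
      obtain ⟨hf, hs⟩ := hpairs _ hmem (not_ne_iff.mp hne)
      exact pvPair_eq _ _ (by simpa using hf) (by simpa using hs)
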